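-- pv_equiv track=rewrite | github.com/teljoa/programacion | python/Tema2/Modular Programming II/boletin/boletin/ejercicio6.py | getNumberOfDigitsBinary
-- ===== SOURCE A (Python) =====
-- def getNumberOfDigitsBinary(cad):
--     cad = str(cad)
--     k=0
--     decimal = False
--     for n in range(len(cad)):
--         if cad[n] in '01':
--             k +=1
--         elif cad[n] == '.' and not decimal and (n != (len(cad)-1)) and (n != 0):
--             if (n == 1 and (cad [0] in '+-')):
--                 return None
--             else:
--                 decimal = True
--         elif (cad[n] == '+' or cad[n] == '-') and n == 0:
--             pass
--         else:
--             return None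
--     return k
-- ===== SOURCE B (Python) =====
-- def getNumberOfDigitsBinary(cad):
--     cad = str(cad)
--     body = cad[1:] if cad[:1] in ('+', '-') else cad
--     if body:
--         parts = body.split('.')
--         if len(parts) > 2 or any(p == '' or any(c not in '01' for c in p) for p in parts):
--             return None
--     return cad.count('0') + cad.count('1')
-- ===== Notes on version B (the rewrite author's own statement) =====
-- stated objective: simpler
-- what changed: Replaces A's character-by-character index loop with its decimal-point flag and positional special cases by a whole-string shape validation (strip optional sign, split on the dot, require at most two non-empty all-binary parts) followed by a direct count of the binary digit characters.
import Mathlib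
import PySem

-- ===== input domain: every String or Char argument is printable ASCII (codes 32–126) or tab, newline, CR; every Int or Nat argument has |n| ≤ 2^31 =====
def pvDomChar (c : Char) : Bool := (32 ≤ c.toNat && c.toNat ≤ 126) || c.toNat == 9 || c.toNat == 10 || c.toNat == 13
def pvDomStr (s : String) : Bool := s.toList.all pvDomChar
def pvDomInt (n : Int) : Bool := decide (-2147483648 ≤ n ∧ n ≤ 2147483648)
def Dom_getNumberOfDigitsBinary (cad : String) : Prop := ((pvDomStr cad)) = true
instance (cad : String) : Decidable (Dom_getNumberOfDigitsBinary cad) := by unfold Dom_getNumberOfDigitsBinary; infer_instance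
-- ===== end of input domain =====

-- B replaces A's index/flag scanning loop by validating the string shape via split-on-'.'
-- (sign stripped, each dot-part non-empty and binary) and counting the binary digits directly: simpler, same cost.

-- ===== PORT A =====
-- the for-loop over range(len(cad)) with early returns, as index recursion over (k, decimal)
def getNumberOfDigitsBinaryLoop (cad : List Char) (n : Nat) (k : Int) (decimal : Bool) : Option Int :=
  if h : n < cad.length then
    if cad[n] = '0' ∨ cad[n] = '1' then
      getNumberOfDigitsBinaryLoop cad (n + 1) (k + 1) decimal
    else if cad[n] = '.' ∧ decimal = false ∧ n ≠ cad.length - 1 ∧ n ≠ 0 then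
      if n = 1 ∧ (cad[0]? = some '+' ∨ cad[0]? = some '-') then none
      else getNumberOfDigitsBinaryLoop cad (n + 1) k true
    else if (cad[n] = '+' ∨ cad[n] = '-') ∧ n = 0 then
      getNumberOfDigitsBinaryLoop cad (n + 1) k decimal
    else none
  else some k
  termination_by cad.length - n

def getNumberOfDigitsBinary (cad : String) : Option Int :=
  getNumberOfDigitsBinaryLoop cad.toList 0 0 false

-- ===== PORT B =====
-- Source B: strip an optional sign, split the body on '.', demand ≤ 2 non-empty all-binary parts,
-- then count '0' and '1' over the whole string (str.split on a 1-char sep = List.splitOn;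
-- str.count of a single char = List.count).
def getNumberOfDigitsBinary_alt (cad : String) : Option Int :=
  let l := cad.toList
  let body := if l.take 1 = ['+'] ∨ l.take 1 = ['-'] then l.drop 1 else l
  if body ≠ [] then
    let parts := body.splitOn '.'
    if 2 < parts.length ∨ parts.any (fun p => p.isEmpty || p.any (fun c => !(c == '0' || c == '1'))) then
      none
    else some ((l.count '0' : Int) + (l.count '1' : Int))
  else some ((l.count '0' : Int) + (l.count '1' : Int))

-- ===== PRECONDITION & SPEC =====
def Spec_getNumberOfDigitsBinary (cad : String) (out : Option Int) : Prop := out = getNumberOfDigitsBinary_alt cad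
instance (cad : String) (out : Option Int) : Decidable (Spec_getNumberOfDigitsBinary cad out) := by unfold Spec_getNumberOfDigitsBinary; infer_instance

-- ===== CLAIM (what is proved, stated in full; the proofs are below) =====
def Claim_equal_getNumberOfDigitsBinary : Prop := ∀ (cad : String), Dom_getNumberOfDigitsBinary cad → Spec_getNumberOfDigitsBinary cad (getNumberOfDigitsBinary cad)

-- ===== LEMMAS AND PROOFS =====

-- A's loop at positions ≥ 1, re-expressed structurally: atStart = "a dot here is still illegal
-- because we are on the first character after a sign (or at position 0)".
def pvScan : List Char → Bool → Bool → Int → Option Int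
  | [], _, _, k => some k
  | c :: rest, atStart, dec, k =>
    if c = '0' ∨ c = '1' then pvScan rest false dec (k + 1)
    else if c = '.' ∧ dec = false ∧ rest ≠ [] ∧ atStart = false then pvScan rest false true k
    else none

def pvCnt (p : List Char) : Int := (p.count '0' : Int) + (p.count '1' : Int)

def pvBinc (p : List Char) : Bool := p.all (fun c => c == '0' || c == '1')

-- validity of the split parts as seen from the "inside a digit run, no dot yet" state
def pvGood2 : List (List Char) → Bool
  | [p] => pvBinc p
  | [p, q] => pvBinc p && !q.isEmpty && pvBinc q
  | _ => false

-- validity of the split parts as seen from the "just after a sign" state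
def pvGoodTop : List (List Char) → Bool
  | [p] => !p.isEmpty && pvBinc p
  | [p, q] => !p.isEmpty && pvBinc p && !q.isEmpty && pvBinc q
  | _ => false

lemma pvSplitOn_cons (c : Char) (l : List Char) :
    (c :: l).splitOn '.' = if c = '.' then [] :: l.splitOn '.' else (l.splitOn '.').modifyHead (c :: ·) := by
  simp [List.splitOn, List.splitOnP_cons]

lemma pvSplitOn_no_dot (l : List Char) (h : '.' ∉ l) : l.splitOn '.' = [l] := by
  induction l with
  | nil => simp [List.splitOn, List.splitOnP_nil]
  | cons c rest ih =>
    rw [pvSplitOn_cons]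
    have hc : c ≠ '.' := fun hc => h (hc ▸ List.mem_cons_self)
    rw [if_neg hc, ih (fun hm => h (List.mem_cons_of_mem _ hm))]
    rfl

lemma pvSplitOn_dot_len (l : List Char) (h : '.' ∈ l) : 2 ≤ (l.splitOn '.').length := by
  induction l with
  | nil => cases h
  | cons c rest ih =>
    rw [pvSplitOn_cons]
    by_cases hc : c = '.'
    · rw [if_pos hc]
      have := List.splitOnP_ne_nil (fun x => x == '.') rest
      simp only [List.length_cons]
      have : (rest.splitOn '.').length ≥ 1 := by
        cases hsp : rest.splitOn '.' with
        | nil => exact absurd hsp (by simpa [List.splitOn] using this)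
        | cons a b => simp
      omega
    · rw [if_neg hc]
      have hm : '.' ∈ rest := by rcases List.mem_cons.mp h with h1 | h1; exact absurd h1.symm hc; exact h1
      have := ih hm
      cases hsp : rest.splitOn '.' with
      | nil => simp [hsp] at this
      | cons a b => simp only [List.modifyHead_cons, List.length_cons]; simp [hsp] at this; omega

lemma pvBinc_no_dot (l : List Char) (h : pvBinc l = true) : '.' ∉ l := by
  intro hm
  have := List.all_eq_true.mp h _ hm
  simp at this

-- dec = true: the remainder must be pure binary
lemma pvScan_dec (p : List Char) : ∀ (s : Bool) (k : Int),
    pvScan p s true k = if pvBinc p then some (k + pvCnt p) else none := by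
  induction p with
  | nil => intro s k; simp [pvScan, pvBinc, pvCnt]
  | cons c rest ih =>
    intro s k
    by_cases hc : c = '0' ∨ c = '1'
    · rw [pvScan, if_pos hc, ih]
      have hb : pvBinc (c :: rest) = pvBinc rest := by
        rcases hc with h | h <;> simp [pvBinc, h]
      have hcnt : pvCnt (c :: rest) = 1 + pvCnt rest := by
        rcases hc with h | h <;> subst h <;>
          simp [pvCnt] <;> ring
      rw [hb, hcnt]
      split_ifs with h
      · congr 1; ring
      · rfl
    · rw [pvScan, if_neg hc, if_neg (by simp)]
      have : pvBinc (c :: rest) = false := by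
        simp only [pvBinc, List.all_cons, not_or] at hc ⊢
        simp [hc.1, hc.2]
      rw [this]; simp

lemma pvGood2_modifyHead (c : Char) (hc : c = '0' ∨ c = '1') (parts : List (List Char))
    (hne : parts ≠ []) : pvGood2 (parts.modifyHead (c :: ·)) = pvGood2 parts := by
  have hb : ∀ p, pvBinc (c :: p) = pvBinc p := by
    intro p; rcases hc with h | h <;> simp [pvBinc, h]
  match parts with
  | [] => exact absurd rfl hne
  | [p] => simp [pvGood2, hb]
  | [p, q] => simp [pvGood2, hb]
  | p :: q :: r :: t => simp [pvGood2]

lemma pvGoodTop_modifyHead (c : Char) (hc : c = '0' ∨ c = '1') (parts : List (List Char))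
    (hne : parts ≠ []) : pvGoodTop (parts.modifyHead (c :: ·)) = pvGood2 parts := by
  have hb : ∀ p, pvBinc (c :: p) = pvBinc p := by
    intro p; rcases hc with h | h <;> simp [pvBinc, h]
  match parts with
  | [] => exact absurd rfl hne
  | [p] => simp [pvGoodTop, pvGood2, hb]
  | [p, q] => simp [pvGoodTop, pvGood2, hb]
  | p :: q :: r :: t => simp [pvGoodTop, pvGood2]

lemma pvGood2_modifyHead_bad (c : Char) (hc : ¬ (c = '0' ∨ c = '1')) (parts : List (List Char))
    (hne : parts ≠ []) : pvGood2 (parts.modifyHead (c :: ·)) = false := by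
  have hb : ∀ p, pvBinc (c :: p) = false := by
    intro p
    simp only [pvBinc, List.all_cons, not_or] at hc ⊢
    simp [hc.1, hc.2]
  match parts with
  | [] => exact absurd rfl hne
  | [p] => simp [pvGood2, hb]
  | [p, q] => simp [pvGood2, hb]
  | p :: q :: r :: t => simp [pvGood2]

lemma pvGoodTop_modifyHead_bad (c : Char) (hc : ¬ (c = '0' ∨ c = '1')) (parts : List (List Char))
    (hne : parts ≠ []) : pvGoodTop (parts.modifyHead (c :: ·)) = false := by
  have hb : ∀ p, pvBinc (c :: p) = false := by
    intro p
    simp only [pvBinc, List.all_cons, not_or] at hc ⊢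
    simp [hc.1, hc.2]
  match parts with
  | [] => exact absurd rfl hne
  | [p] => simp [pvGoodTop, hb]
  | [p, q] => simp [pvGoodTop, hb]
  | p :: q :: r :: t => simp [pvGoodTop]

lemma pvSplitOn_ne_nil (l : List Char) : l.splitOn '.' ≠ [] := by
  simpa [List.splitOn] using List.splitOnP_ne_nil (fun x => x == '.') l

-- the "inside a run" state vs the split parts
lemma pvScan_run (p : List Char) : ∀ (k : Int),
    pvScan p false false k = if pvGood2 (p.splitOn '.') then some (k + pvCnt p) else none := by
  induction p with
  | nil => intro k; simp [pvScan, List.splitOn, List.splitOnP_nil, pvGood2, pvBinc, pvCnt]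
  | cons c rest ih =>
    intro k
    by_cases hc : c = '0' ∨ c = '1'
    · have hcd : ¬ c = '.' := by rcases hc with h | h <;> subst h <;> decide
      rw [pvScan, if_pos hc, ih, pvSplitOn_cons, if_neg hcd,
        pvGood2_modifyHead c hc _ (pvSplitOn_ne_nil rest)]
      have hcnt : pvCnt (c :: rest) = 1 + pvCnt rest := by
        rcases hc with h | h <;> subst h <;>
          simp [pvCnt] <;> ring
      rw [hcnt]
      split_ifs with h
      · congr 1; ring
      · rfl
    · by_cases hd : c = '.'
      · subst hd
        rw [pvScan, if_neg hc, pvSplitOn_cons, if_pos rfl]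
        by_cases hr : rest = []
        · subst hr
          simp [pvGood2, List.splitOn, List.splitOnP_nil]
        · rw [if_pos ⟨rfl, rfl, hr, rfl⟩, pvScan_dec]
          by_cases hb : pvBinc rest = true
          · rw [pvSplitOn_no_dot rest (pvBinc_no_dot rest hb)]
            have hcnt : pvCnt ('.' :: rest) = pvCnt rest := by
              simp [pvCnt]
            simp [pvGood2, hr, hcnt, pvBinc]
          · rw [Bool.not_eq_true] at hb
            rw [hb]
            by_cases hm : '.' ∈ rest
            · have h2 := pvSplitOn_dot_len rest hm
              have : pvGood2 ([] :: rest.splitOn '.') = false := by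
                match hsp : rest.splitOn '.' with
                | [] => exact absurd hsp (pvSplitOn_ne_nil rest)
                | [a] => simp [hsp] at h2
                | a :: b :: t => simp [pvGood2]
              simp [this]
            · rw [pvSplitOn_no_dot rest hm]
              simp [pvGood2, hb]
      · rw [pvScan, if_neg hc, if_neg (by simp [hd]), pvSplitOn_cons, if_neg hd]
        rw [pvGood2_modifyHead_bad c hc _ (pvSplitOn_ne_nil rest)]
        simp

lemma pvGoodTop_cons_nil (parts : List (List Char)) : pvGoodTop ([] :: parts) = false := by
  match parts with
  | [] => rfl
  | [q] => simp [pvGoodTop]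
  | q :: r :: t => simp [pvGoodTop]

-- the "just after a sign" state vs the split parts
lemma pvScan_top (p : List Char) (k : Int) (hp : p ≠ []) :
    pvScan p true false k = if pvGoodTop (p.splitOn '.') then some (k + pvCnt p) else none := by
  match p with
  | [] => exact absurd rfl hp
  | c :: rest =>
    by_cases hc : c = '0' ∨ c = '1'
    · have hcd : ¬ c = '.' := by rcases hc with h | h <;> subst h <;> decide
      rw [pvScan, if_pos hc, pvScan_run, pvSplitOn_cons, if_neg hcd,
        pvGoodTop_modifyHead c hc _ (pvSplitOn_ne_nil rest)]
      have hcnt : pvCnt (c :: rest) = 1 + pvCnt rest := by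
        rcases hc with h | h <;> subst h <;>
          simp [pvCnt] <;> ring
      rw [hcnt]
      split_ifs with h
      · congr 1; ring
      · rfl
    · by_cases hd : c = '.'
      · subst hd
        rw [pvScan, if_neg hc, if_neg (by simp), pvSplitOn_cons, if_pos rfl, pvGoodTop_cons_nil]
        simp
      · rw [pvScan, if_neg hc, if_neg (by simp [hd]), pvSplitOn_cons, if_neg hd,
          pvGoodTop_modifyHead_bad c hc _ (pvSplitOn_ne_nil rest)]
        simp

-- B's rejection test over the parts is exactly ¬ pvGoodTop
lemma pvAltCheck (parts : List (List Char)) (hne : parts ≠ []) :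
    (2 < parts.length ∨ parts.any (fun p => p.isEmpty || p.any (fun c => !(c == '0' || c == '1'))) = true)
      ↔ pvGoodTop parts = false := by
  match parts with
  | [] => exact absurd rfl hne
  | [p] =>
    have hb : pvBinc p = !(p.any (fun c => !(c == '0' || c == '1'))) := by
      simp [pvBinc, List.all_eq_not_any_not]
    cases hq : p.any (fun c => !(c == '0' || c == '1')) <;> cases hp : p.isEmpty <;>
      simp only [pvGoodTop, hb, hp, hq, List.any_cons, List.any_nil, Bool.or_false,
        List.length_cons, List.length_nil] <;> decide
  | [p, q] =>
    have hb1 : pvBinc p = !(p.any (fun c => !(c == '0' || c == '1'))) := by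
      simp [pvBinc, List.all_eq_not_any_not]
    have hb2 : pvBinc q = !(q.any (fun c => !(c == '0' || c == '1'))) := by
      simp [pvBinc, List.all_eq_not_any_not]
    cases h1 : p.any (fun c => !(c == '0' || c == '1')) <;>
      cases h2 : q.any (fun c => !(c == '0' || c == '1')) <;>
        cases hp : p.isEmpty <;> cases hq2 : q.isEmpty <;>
          simp only [pvGoodTop, hb1, hb2, h1, h2, hp, hq2, List.any_cons, List.any_nil,
            Bool.or_false, List.length_cons, List.length_nil] <;> decide
  | p :: q :: r :: t =>
    constructor
    · intro _; rfl
    · intro _; left; simp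

-- A's loop at any position n ≥ 1 is pvScan on the remaining characters
lemma pvBridge : ∀ (m : Nat) (cad : List Char) (n : Nat) (k : Int) (dec : Bool),
    cad.length - n ≤ m → n ≠ 0 →
    getNumberOfDigitsBinaryLoop cad n k dec =
      pvScan (cad.drop n) (n == 1 && (cad[0]? == some '+' || cad[0]? == some '-')) dec k := by
  intro m
  induction m with
  | zero =>
    intro cad n k dec hm hn
    have h : ¬ n < cad.length := by omega
    rw [getNumberOfDigitsBinaryLoop, dif_neg h, List.drop_eq_nil_iff.mpr (by omega), pvScan]
  | succ m ih =>
    intro cad n k dec hm hn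
    by_cases h : n < cad.length
    · rw [getNumberOfDigitsBinaryLoop, dif_pos h, List.drop_eq_getElem_cons h, pvScan]
      have hstep : ∀ (k' : Int) (d' : Bool),
          getNumberOfDigitsBinaryLoop cad (n + 1) k' d' = pvScan (cad.drop (n + 1)) false d' k' := by
        intro k' d'
        rw [ih cad (n + 1) k' d' (by omega) (by omega)]
        have : ((n + 1 : Nat) == 1) = false := by simp; omega
        rw [this, Bool.false_and]
      by_cases hc : cad[n] = '0' ∨ cad[n] = '1'
      · rw [if_pos hc, if_pos hc, hstep]
      · rw [if_neg hc, if_neg hc]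
        by_cases hb : cad[n] = '.' ∧ dec = false ∧ n ≠ cad.length - 1 ∧ n ≠ 0
        · rw [if_pos hb]
          by_cases hs : n = 1 ∧ (cad[0]? = some '+' ∨ cad[0]? = some '-')
          · rw [if_pos hs, if_neg]
            rintro ⟨-, -, -, hat⟩
            rw [hs.1] at hat
            rcases hs.2 with h2 | h2 <;> simp [h2] at hat
          · rw [if_neg hs, hstep, if_pos]
            refine ⟨hb.1, hb.2.1, ?_, ?_⟩
            · rw [Ne, List.drop_eq_nil_iff]; omega
            · cases hn1 : (n == 1) with
              | false => simp
              | true =>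
                have : n = 1 := by simpa using hn1
                rw [Bool.true_and]
                have : ¬ (cad[0]? = some '+' ∨ cad[0]? = some '-') := fun hh => hs ⟨this, hh⟩
                rw [not_or] at this
                simp [this.1, this.2]
        · have hsig : ¬ ((cad[n] = '+' ∨ cad[n] = '-') ∧ n = 0) := fun hsig => hn hsig.2
          rw [if_neg hb, if_neg hsig, if_neg
            (fun hcond => hb ⟨hcond.1, hcond.2.1,
              by have h3 := hcond.2.2.1; rw [Ne, List.drop_eq_nil_iff] at h3; omega, hn⟩)]
    · rw [getNumberOfDigitsBinaryLoop, dif_neg h, List.drop_eq_nil_iff.mpr (by omega), pvScan]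

lemma pvTake1 (c : Char) (l : List Char) : (c :: l).take 1 = [c] := rfl

-- counts: a non-digit head contributes nothing
lemma pvCnt_cons_ne (c : Char) (rest : List Char) (h0 : c ≠ '0') (h1 : c ≠ '1') :
    pvCnt (c :: rest) = pvCnt rest := by
  simp [pvCnt, h0, h1]

lemma pvCnt_cons_digit (c : Char) (rest : List Char) (hc : c = '0' ∨ c = '1') :
    pvCnt (c :: rest) = 1 + pvCnt rest := by
  rcases hc with h | h <;> subst h <;>
    simp [pvCnt] <;> ring

lemma pvMain (l : List Char) :
    getNumberOfDigitsBinaryLoop l 0 0 false =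
      (let body := if l.take 1 = ['+'] ∨ l.take 1 = ['-'] then l.drop 1 else l
       if body ≠ [] then
         let parts := body.splitOn '.'
         if 2 < parts.length ∨ parts.any (fun p => p.isEmpty || p.any (fun c => !(c == '0' || c == '1'))) then
           none
         else some ((l.count '0' : Int) + (l.count '1' : Int))
       else some ((l.count '0' : Int) + (l.count '1' : Int))) := by
  match l with
  | [] =>
    rw [getNumberOfDigitsBinaryLoop]
    simp
  | c :: rest =>
    have hlen : 0 < (c :: rest).length := by simp
    rw [getNumberOfDigitsBinaryLoop, dif_pos hlen]
    simp only [List.getElem_cons_zero, zero_add]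
    have hcntl : ((c :: rest).count '0' : Int) + ((c :: rest).count '1' : Int) = pvCnt (c :: rest) := rfl
    by_cases hc : c = '0' ∨ c = '1'
    · -- first character is a binary digit
      rw [if_pos hc,
        pvBridge rest.length (c :: rest) 1 1 false (by simp) one_ne_zero]
      have hat : ((1 : Nat) == 1 && ((c :: rest)[0]? == some '+' || (c :: rest)[0]? == some '-')) = false := by
        rcases hc with h | h <;> subst h <;> rfl
      rw [hat, List.drop_one, List.tail_cons, pvScan_run]
      have hbody : (if (c :: rest).take 1 = ['+'] ∨ (c :: rest).take 1 = ['-'] then rest else (c :: rest)) = c :: rest := by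
        rcases hc with h | h <;> subst h <;> rfl
      simp only [hbody]
      rw [if_pos (List.cons_ne_nil c rest)]
      have hsp : (c :: rest).splitOn '.' = (rest.splitOn '.').modifyHead (c :: ·) := by
        rw [pvSplitOn_cons, if_neg (by rcases hc with h | h <;> subst h <;> decide)]
      simp only [hsp]
      have hne : (rest.splitOn '.').modifyHead (c :: ·) ≠ [] := by
        have h := pvSplitOn_ne_nil rest
        cases hsp : rest.splitOn '.' with
        | nil => exact absurd hsp h
        | cons a b => simp
      have hgt := pvGoodTop_modifyHead c hc _ (pvSplitOn_ne_nil rest)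
      by_cases hg : pvGood2 (rest.splitOn '.') = true
      · rw [if_pos hg, if_neg (fun hcond => by rw [(pvAltCheck _ hne).mp hcond, hg] at hgt; cases hgt),
          hcntl, pvCnt_cons_digit c rest hc]
      · rw [if_neg hg, if_pos ((pvAltCheck _ hne).mpr (by rw [hgt]; exact Bool.not_eq_true _ ▸ Bool.eq_false_iff.mpr (fun hh => hg (hh ▸ rfl))))]
    · by_cases hs : c = '+' ∨ c = '-'
      · -- leading sign
        rw [if_neg hc, if_neg (by rintro ⟨-, -, -, h⟩; exact h rfl), if_pos ⟨hs, by trivial⟩,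
          pvBridge rest.length (c :: rest) 1 0 false (by simp) one_ne_zero]
        have hat : ((1 : Nat) == 1 && ((c :: rest)[0]? == some '+' || (c :: rest)[0]? == some '-')) = true := by
          rcases hs with h | h <;> subst h <;> rfl
        rw [hat, List.drop_one, List.tail_cons]
        have hbody : (if (c :: rest).take 1 = ['+'] ∨ (c :: rest).take 1 = ['-'] then rest else (c :: rest)) = rest := by
          rcases hs with h | h <;> subst h <;> rfl
        simp only [hbody]
        have hcnt2 : pvCnt (c :: rest) = pvCnt rest :=
          pvCnt_cons_ne c rest (by rintro rfl; exact hc (Or.inl rfl)) (by rintro rfl; exact hc (Or.inr rfl))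
        cases rest with
        | nil => rcases hs with h | h <;> subst h <;> rfl
        | cons r rest' =>
          rw [pvScan_top _ 0 (List.cons_ne_nil r rest'), if_pos (List.cons_ne_nil r rest')]
          by_cases hg : pvGoodTop ((r :: rest').splitOn '.') = true
          · rw [if_pos hg, if_neg (fun hcond => by rw [(pvAltCheck _ (pvSplitOn_ne_nil _)).mp hcond] at hg; cases hg),
              hcntl, hcnt2]
            congr 1
            ring
          · rw [if_neg hg,
              if_pos ((pvAltCheck _ (pvSplitOn_ne_nil _)).mpr (Bool.eq_false_iff.mpr hg))]
      · by_cases hd : c = '.'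
        · -- leading dot: A rejects at n = 0; B sees an empty first part
          subst hd
          rw [if_neg hc, if_neg (by rintro ⟨-, -, -, h⟩; exact h rfl), if_neg (by rintro ⟨h, -⟩; exact hs h)]
          have hbody : (if ('.' :: rest).take 1 = ['+'] ∨ ('.' :: rest).take 1 = ['-'] then List.drop 1 ('.' :: rest) else ('.' :: rest)) = '.' :: rest := by
            rw [pvTake1, if_neg (by decide)]
          simp only [hbody]
          rw [if_pos (List.cons_ne_nil _ rest), pvSplitOn_cons, if_pos rfl, if_pos]
          right
          simp
        · -- any other character: both reject
          rw [if_neg hc, if_neg (by rintro ⟨h, -⟩; exact hd h), if_neg (by rintro ⟨h, -⟩; exact hs h)]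
          have hbody : (if (c :: rest).take 1 = ['+'] ∨ (c :: rest).take 1 = ['-'] then List.drop 1 (c :: rest) else (c :: rest)) = c :: rest := by
            rw [pvTake1, if_neg]
            rintro (h | h) <;> [exact hs (Or.inl (by simpa using h)); exact hs (Or.inr (by simpa using h))]
          simp only [hbody]
          rw [if_pos (List.cons_ne_nil c rest), pvSplitOn_cons, if_neg hd, if_pos]
          have hne : (rest.splitOn '.').modifyHead (c :: ·) ≠ [] := by
            have h := pvSplitOn_ne_nil rest
            cases hsp : rest.splitOn '.' with
            | nil => exact absurd hsp h
            | cons a b => simp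
          exact (pvAltCheck _ hne).mpr (pvGoodTop_modifyHead_bad c hc _ (pvSplitOn_ne_nil rest))

-- ===== VERDICT (by name: the statement is the Claim_ definition above) =====
theorem getNumberOfDigitsBinary_spec : Claim_equal_getNumberOfDigitsBinary := by
  intro cad _
  unfold Spec_getNumberOfDigitsBinary getNumberOfDigitsBinary getNumberOfDigitsBinary_alt
  exact pvMain cad.toList
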